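-- pv_equiv track=rewrite | github.com/IITTeaching/cs520-f23-group-5 | data_curation_project/script.py | extract_longest_number_string
-- ===== SOURCE A (Python) =====
-- def extract_longest_number_string(input_string):
--     current_number = ""
--     longest_number = ""
--     for char in input_string:
--         if char.isdigit() or char == '.':
--             current_number += char
--         else:
--             if len(current_number) > len(longest_number):
--                 longest_number = current_number
--             current_number = ""
--     if len(current_number) > len(longest_number):
--         longest_number = current_number
--     if longest_number == '.':
--         return ""
--     return longest_number
-- ===== SOURCE B (Python) =====
-- def extract_longest_number_string(input_string):
--     # Dynamic programming over a run-length table: lens[i] = length of the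
--     # numeric run ending just before position i; then one max, one index
--     # lookup and one slice recover the first longest run.
--     n = len(input_string)
--     lens = [0] * (n + 1)
--     for i in range(n):
--         c = input_string[i]
--         lens[i + 1] = lens[i] + 1 if (c.isdigit() or c == '.') else 0
--     m = max(lens)
--     e = lens.index(m)
--     run = input_string[e - m:e]
--     return '' if run == '.' else run
-- ===== Notes on version B (the rewrite author's own statement) =====
-- stated objective: alternative
-- what changed: Replaced the single-pass current/longest accumulator scan by staged passes over a dynamic-programming run-length table lens (lens[i+1] = lens[i]+1 for digit/dot else 0): max(lens) gives the longest-run length, lens.index of that max gives the end of the first such run, and a slice extracts it.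
import Mathlib
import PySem

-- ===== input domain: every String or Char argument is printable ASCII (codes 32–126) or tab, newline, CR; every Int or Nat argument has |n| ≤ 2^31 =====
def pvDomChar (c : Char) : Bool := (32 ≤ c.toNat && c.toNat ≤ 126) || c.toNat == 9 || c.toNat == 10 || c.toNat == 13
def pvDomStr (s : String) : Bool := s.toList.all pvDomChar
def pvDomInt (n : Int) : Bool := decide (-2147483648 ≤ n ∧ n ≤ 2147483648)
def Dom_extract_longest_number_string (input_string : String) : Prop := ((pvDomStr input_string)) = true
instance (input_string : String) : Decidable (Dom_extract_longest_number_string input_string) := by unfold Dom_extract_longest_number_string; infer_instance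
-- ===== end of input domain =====

-- B replaces A's accumulator scan by staged passes — a run-length table, then max / first-index / slice recover the first longest run (alternative decomposition, same cost).


-- the predicate `char.isdigit() or char == '.'` shared by both programs
def pvNumChar (c : Char) : Bool := PySem.Chars.isdigit c || c == '.'

-- ===== PORT A =====
-- A's loop body: state (current_number, longest_number)
def pvStep (st : List Char × List Char) (c : Char) : List Char × List Char :=
  if pvNumChar c then (st.1 ++ [c], st.2)
  else ([], if st.1.length > st.2.length then st.1 else st.2)

def extract_longest_number_string (input_string : String) : String :=
  let st := input_string.toList.foldl pvStep ([], [])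
  let longest := if st.1.length > st.2.length then st.1 else st.2
  if longest = ['.'] then "" else String.ofList longest

-- ===== PORT B =====
-- the loop `lens[i+1] = lens[i] + 1 if numeric else 0`: tail of the lens table after a cell of value k
def pvLensFrom (k : Nat) : List Char → List Nat
  | [] => []
  | c :: cs =>
    (if pvNumChar c then k + 1 else 0) :: pvLensFrom (if pvNumChar c then k + 1 else 0) cs

def extract_longest_number_string_alt (input_string : String) : String :=
  let lens : List Nat := 0 :: pvLensFrom 0 input_string.toList   -- the filled table, lens[0] = 0
  let m := lens.foldl max 0                                      -- max(lens): running max (first cell is 0)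
  let e := (PySem.List.index? lens m).getD 0                     -- lens.index(m); m ∈ lens, so never none
  let run := PySem.List.slice input_string.toList (some ((e : Int) - (m : Int))) (some (e : Int))  -- input_string[e-m:e]
  if run = ['.'] then "" else String.ofList run

-- ===== PRECONDITION & SPEC =====
def Spec_extract_longest_number_string (input_string : String) (out : String) : Prop := out = extract_longest_number_string_alt input_string
instance (input_string : String) (out : String) : Decidable (Spec_extract_longest_number_string input_string out) := by unfold Spec_extract_longest_number_string; infer_instance

-- ===== CLAIM (what is proved, stated in full; the proofs are below) =====
def Claim_equal_extract_longest_number_string : Prop := ∀ (input_string : String), Dom_extract_longest_number_string input_string → Spec_extract_longest_number_string input_string (extract_longest_number_string input_string)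

-- ===== LEMMAS AND PROOFS =====

-- the maximal numeric runs of a character list (proof-side characterisation both ports are reduced to)
def pvRuns (l : List Char) : List (List Char) :=
  match l with
  | [] => []
  | c :: cs =>
    if pvNumChar c then (c :: cs.takeWhile pvNumChar) :: pvRuns (cs.dropWhile pvNumChar)
    else pvRuns cs
termination_by l.length
decreasing_by
  · exact Nat.lt_succ_of_le (List.length_dropWhile_le ..)
  · simp
def pvMaxLen (a r : List Char) : List Char := if r.length > a.length then r else a
lemma pvMaxLen_nil (x : List Char) : pvMaxLen [] x = x := by cases x <;> simp [pvMaxLen]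
lemma pvRuns_head (b : List Char) (cs : List Char) :
    List.foldl pvMaxLen b (cs.takeWhile pvNumChar :: pvRuns (cs.dropWhile pvNumChar))
      = List.foldl pvMaxLen b (pvRuns cs) := by
  cases cs with
  | nil => simp [pvRuns, pvMaxLen]
  | cons d ds =>
    cases h : pvNumChar d with
    | true => simp [pvRuns, h]
    | false => simp [pvRuns, pvMaxLen, h]
-- A-side loop invariant: A's loop followed by the final flush is a pvMaxLen fold over the runs
lemma pv_main (l : List Char) : ∀ (cur best : List Char),
    (if (List.foldl pvStep (cur, best) l).1.length > (List.foldl pvStep (cur, best) l).2.length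
     then (List.foldl pvStep (cur, best) l).1 else (List.foldl pvStep (cur, best) l).2)
      = List.foldl pvMaxLen best ((cur ++ l.takeWhile pvNumChar) :: pvRuns (l.dropWhile pvNumChar)) := by
  induction l with
  | nil => intro cur best; simp [pvRuns, pvMaxLen]
  | cons c cs ih =>
    intro cur best
    cases h : pvNumChar c with
    | true =>
      have hs : pvStep (cur, best) c = (cur ++ [c], best) := by simp [pvStep, h]
      rw [List.foldl_cons, hs, ih]
      simp [h]
    | false =>
      have hs : pvStep (cur, best) c = ([], pvMaxLen best cur) := by simp [pvStep, pvMaxLen, h]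
      rw [List.foldl_cons, hs, ih, List.nil_append, pvRuns_head]
      simp [pvRuns, h, pvMaxLen]

lemma pvMaxLen_fold_seed (rs : List (List Char)) : ∀ (a : List Char),
    List.foldl pvMaxLen a rs
      = if (List.foldl pvMaxLen [] rs).length > a.length then List.foldl pvMaxLen [] rs else a := by
  induction rs with
  | nil => intro a; simp
  | cons x t ih =>
    intro a
    rw [List.foldl_cons, List.foldl_cons, pvMaxLen_nil, ih (pvMaxLen a x), ih x]
    unfold pvMaxLen
    split_ifs <;> first | rfl | omega
lemma pvLensFrom_run (r : List Char) : ∀ (k : Nat) (rest : List Char),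
    (∀ c ∈ r, pvNumChar c = true) →
    pvLensFrom k (r ++ rest) = List.range' (k + 1) r.length ++ pvLensFrom (k + r.length) rest := by
  induction r with
  | nil => intro k rest _; simp [pvLensFrom]
  | cons c cs ih =>
    intro k rest hnum
    have hc : pvNumChar c = true := hnum c (by simp)
    simp only [List.cons_append, pvLensFrom, hc, if_true, List.length_cons, List.range'_succ]
    rw [ih (k+1) rest (fun d hd => hnum d (by simp [hd]))]
    have h1 : k + 1 + 1 = k + 2 := by omega
    have h2 : k + 1 + cs.length = k + (cs.length + 1) := by omega
    simp [h1, h2]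
lemma pvFoldl_max_init (xs : List Nat) : ∀ (a : Nat),
    xs.foldl max a = max a (xs.foldl max 0) := by
  induction xs with
  | nil => intro a; simp
  | cons c t ih =>
    intro a
    rw [List.foldl_cons, List.foldl_cons, ih (max a c), ih (max 0 c)]
    omega
lemma pvRange'_foldl_max (n : Nat) : (List.range' 0 (n + 1)).foldl max 0 = n := by
  induction n with
  | zero => simp [List.range']
  | succ k ih =>
    rw [List.range'_concat, List.foldl_append, ih]
    simp
lemma pvDropWhile_head {α : Type} (p : α → Bool) (l : List α) :
    ∀ (d : α) (t : List α), l.dropWhile p = d :: t → p d = false := by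
  induction l with
  | nil => intro d t h; simp at h
  | cons c cs ih =>
    intro d t h
    by_cases hc : p c
    · exact ih d t (by simpa [List.dropWhile_cons, hc] using h)
    · rw [List.dropWhile_cons] at h
      simp [hc] at h
      rw [← h.1]; simpa using hc

-- the table decomposition along the leading run
lemma pvLens_decomp (l : List Char) (d : Char) (rest' : List Char)
    (hrest : l.dropWhile pvNumChar = d :: rest') :
    0 :: pvLensFrom 0 l
      = List.range' 0 ((l.takeWhile pvNumChar).length + 1) ++ (0 :: pvLensFrom 0 rest') := by
  have hd : pvNumChar d = false := pvDropWhile_head _ _ _ _ hrest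
  have hsplit : l.takeWhile pvNumChar ++ (d :: rest') = l := by
    rw [← hrest]; exact List.takeWhile_append_dropWhile
  calc 0 :: pvLensFrom 0 l
      = 0 :: pvLensFrom 0 (l.takeWhile pvNumChar ++ (d :: rest')) := by rw [hsplit]
    _ = 0 :: (List.range' 1 (l.takeWhile pvNumChar).length ++ pvLensFrom (l.takeWhile pvNumChar).length (d :: rest')) := by
          rw [pvLensFrom_run _ 0 _ (fun c hc => List.mem_takeWhile_imp hc)]; simp
    _ = _ := by
          simp only [pvLensFrom, hd, if_false, List.range'_succ]
          simp
lemma pvLens_all (l : List Char) (hrest : l.dropWhile pvNumChar = []) :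
    0 :: pvLensFrom 0 l = List.range' 0 (l.length + 1) := by
  have hsplit : l.takeWhile pvNumChar = l := by
    conv_rhs => rw [← List.takeWhile_append_dropWhile (p := pvNumChar) (l := l)]
    rw [hrest]; simp
  conv_lhs => rw [← hsplit]
  rw [show l.takeWhile pvNumChar = l.takeWhile pvNumChar ++ [] by simp,
      pvLensFrom_run _ 0 _ (fun c hc => List.mem_takeWhile_imp hc)]
  simp [pvLensFrom, List.range'_succ, hsplit]

lemma pvB_len : ∀ (n : Nat) (l : List Char), l.length ≤ n →
    (0 :: pvLensFrom 0 l).foldl max 0 = (List.foldl pvMaxLen [] (pvRuns l)).length := by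
  intro n
  induction n with
  | zero =>
    intro l hl
    have : l = [] := List.length_eq_zero_iff.mp (Nat.le_zero.mp hl)
    subst this
    simp [pvLensFrom, pvRuns]
  | succ n ih =>
    intro l hl
    cases hrest : l.dropWhile pvNumChar with
    | nil =>
      rw [pvLens_all l hrest, pvRange'_foldl_max]
      have := pvRuns_head [] l
      rw [hrest] at this
      simp only [pvRuns, List.foldl_cons, List.foldl_nil] at this
      rw [← this, pvMaxLen_nil]
      have hsplit : l.takeWhile pvNumChar = l := by
        conv_rhs => rw [← List.takeWhile_append_dropWhile (p := pvNumChar) (l := l)]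
        rw [hrest]; simp
      rw [hsplit]
    | cons d rest' =>
      have hd : pvNumChar d = false := pvDropWhile_head _ _ _ _ hrest
      have hsplit : l.takeWhile pvNumChar ++ (d :: rest') = l := by
        rw [← hrest]; exact List.takeWhile_append_dropWhile
      have hlen : rest'.length ≤ n := by
        have h' : (l.takeWhile pvNumChar).length + (rest'.length + 1) = l.length := by
          conv_rhs => rw [← hsplit]
          simp
        omega
      -- LHS
      rw [pvLens_decomp l d rest' hrest, List.foldl_append, pvRange'_foldl_max,
          pvFoldl_max_init, ih rest' hlen]
      -- RHS
      have hh := pvRuns_head [] l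
      rw [hrest] at hh
      have hruns : pvRuns (d :: rest') = pvRuns rest' := by
        simp [pvRuns, hd]
      rw [hruns] at hh
      rw [← hh, List.foldl_cons, pvMaxLen_nil,
          pvMaxLen_fold_seed (pvRuns rest') (l.takeWhile pvNumChar)]
      split_ifs with hgt
      · omega
      · omega

lemma pvLensFrom_le (l : List Char) : ∀ (k i : Nat) (h : i < (pvLensFrom k l).length),
    (pvLensFrom k l)[i] ≤ k + i + 1 := by
  induction l with
  | nil => intro k i h; simp [pvLensFrom] at h
  | cons c cs ih =>
    intro k i h
    cases i with
    | zero => simp [pvLensFrom]; split <;> omega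
    | succ j =>
      cases hc : pvNumChar c with
      | true =>
        have hlen : j < (pvLensFrom (k + 1) cs).length := by
          have h' := h; simp [pvLensFrom, hc] at h'; omega
        have := ih (k + 1) j hlen
        simp [pvLensFrom, hc]
        omega
      | false =>
        have hlen : j < (pvLensFrom 0 cs).length := by
          have h' := h; simp [pvLensFrom, hc] at h'; omega
        have := ih 0 j hlen
        simp [pvLensFrom, hc]
        omega

lemma pvLens_get_le (x : List Char) (i : Nat) (h : i < (0 :: pvLensFrom 0 x).length) :
    (0 :: pvLensFrom 0 x)[i] ≤ i := by
  cases i with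
  | zero => simp
  | succ j =>
    have := pvLensFrom_le x 0 j (by simpa using h)
    simpa using this

lemma pvIndex?_range'_last (n : Nat) : PySem.List.index? (List.range' 0 (n + 1)) n = some n := by
  rw [List.range'_concat]
  have h : n ∉ List.range' 0 n := by
    intro h; have := List.mem_range'_1.mp h; omega
  simpa using PySem.List.index?_append_singleton_self _ _ h

lemma pvIndex?_append_shift {α : Type} [BEq α] [LawfulBEq α] (p : List α) :
    ∀ (s : List α) (v : α), v ∉ p →
    PySem.List.index? (p ++ s) v = (PySem.List.index? s v).map (· + p.length) := by
  induction p with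
  | nil => intro s v _; simp
  | cons x t ih =>
    intro s v hv
    have hx : x ≠ v := by intro h; exact hv (by simp [h])
    rw [List.cons_append, PySem.List.index?_cons_of_ne _ hx, ih s v (by intro h; exact hv (by simp [h]))]
    cases PySem.List.index? s v
    · simp
    · simp; omega

lemma pvWhile_run (q : List Char) (d : Char) (rest : List Char)
    (hqnum : ∀ c ∈ q, pvNumChar c = true) (hd : pvNumChar d = false) :
    (q ++ d :: rest).takeWhile pvNumChar = q ∧ (q ++ d :: rest).dropWhile pvNumChar = d :: rest := by
  induction q with
  | nil => simp [List.takeWhile_cons, List.dropWhile_cons, hd]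
  | cons c q' ih =>
    have hc : pvNumChar c = true := hqnum c (by simp)
    have := ih (fun x hx => hqnum x (by simp [hx]))
    simp [List.takeWhile_cons, List.dropWhile_cons, hc, this.1, this.2]

lemma pvLens_decomp' (q : List Char) (d : Char) (rest : List Char)
    (hqnum : ∀ c ∈ q, pvNumChar c = true) (hd : pvNumChar d = false) :
    0 :: pvLensFrom 0 (q ++ d :: rest)
      = List.range' 0 (q.length + 1) ++ (0 :: pvLensFrom 0 rest) := by
  rw [pvLensFrom_run q 0 _ hqnum]
  simp only [pvLensFrom, hd, List.range'_succ]
  simp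

lemma pvRuns_run (q : List Char) (d : Char) (rest : List Char)
    (hqnum : ∀ c ∈ q, pvNumChar c = true) (hd : pvNumChar d = false) :
    List.foldl pvMaxLen [] (pvRuns (q ++ d :: rest)) = List.foldl pvMaxLen q (pvRuns rest) := by
  have hh := pvRuns_head [] (q ++ d :: rest)
  rw [(pvWhile_run q d rest hqnum hd).1, (pvWhile_run q d rest hqnum hd).2] at hh
  have hruns : pvRuns (d :: rest) = pvRuns rest := by simp [pvRuns, hd]
  rw [hruns] at hh
  rw [← hh, List.foldl_cons, pvMaxLen_nil]

lemma pvB_main : ∀ (n : Nat) (l : List Char), l.length ≤ n → ∀ (m e : Nat),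
    m = (0 :: pvLensFrom 0 l).foldl max 0 →
    e = (PySem.List.index? (0 :: pvLensFrom 0 l) m).getD 0 →
    PySem.List.slice l (some ((e : Int) - (m : Int))) (some (e : Int))
      = List.foldl pvMaxLen [] (pvRuns l) := by
  intro n
  induction n with
  | zero =>
    intro l hl m e hm he
    have : l = [] := List.length_eq_zero_iff.mp (Nat.le_zero.mp hl)
    subst this
    simp [pvLensFrom] at hm he
    subst hm; subst he
    have hr : pvRuns [] = [] := by simp [pvRuns]
    rw [hr]
    decide
  | succ n ih =>
    intro l hl m e hm he
    cases hrest : l.dropWhile pvNumChar with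
    | nil =>
      have hsplit : l.takeWhile pvNumChar = l := by
        conv_rhs => rw [← List.takeWhile_append_dropWhile (p := pvNumChar) (l := l)]
        rw [hrest]; simp
      rw [pvLens_all l hrest, pvRange'_foldl_max] at hm
      subst hm
      rw [pvLens_all l hrest, pvIndex?_range'_last] at he
      simp at he
      subst he
      have hc : ((l.length : Int) - (l.length : Int)) = ((0 : Nat) : Int) := by omega
      rw [hc, PySem.List.slice_natCast]
      simp
      have hh := pvRuns_head [] l
      rw [hrest] at hh
      simp only [pvRuns, List.foldl_cons, List.foldl_nil] at hh
      rw [← hh, pvMaxLen_nil, hsplit]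
    | cons d rest' =>
      have hd : pvNumChar d = false := pvDropWhile_head _ _ _ _ hrest
      have hl' : l = l.takeWhile pvNumChar ++ (d :: rest') := by
        conv_lhs => rw [← List.takeWhile_append_dropWhile (p := pvNumChar) (l := l)]
        rw [hrest]
      obtain ⟨q, hq⟩ : ∃ q, l.takeWhile pvNumChar = q := ⟨_, rfl⟩
      have hqnum : ∀ c ∈ q, pvNumChar c = true := fun c hc => List.mem_takeWhile_imp (hq ▸ hc)
      rw [hq] at hl'
      subst hl'
      have hlen : rest'.length ≤ n := by
        simp at hl
        omega
      have hdec := pvLens_decomp' q d rest' hqnum hd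
      have hm2 : m = max q.length ((0 :: pvLensFrom 0 rest').foldl max 0) := by
        rw [hm, hdec, List.foldl_append, pvRange'_foldl_max, pvFoldl_max_init]
      obtain ⟨m', hm'⟩ : ∃ x, (0 :: pvLensFrom 0 rest').foldl max 0 = x := ⟨_, rfl⟩
      obtain ⟨F', hF'⟩ : ∃ x, List.foldl pvMaxLen [] (pvRuns rest') = x := ⟨_, rfl⟩
      rw [hm'] at hm2
      have hm'F : m' = F'.length := by
        rw [← hm', ← hF']
        exact pvB_len n rest' hlen
      rw [pvRuns_run q d rest' hqnum hd, pvMaxLen_fold_seed, hF']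
      by_cases hcase : m' ≤ q.length
      · -- the leading run is the answer
        have hmq : m = q.length := by rw [hm2]; omega
        subst hmq
        rw [hdec, PySem.List.index?_append_of_mem _
              (List.mem_range'_1.mpr ⟨Nat.zero_le _, by omega⟩),
            pvIndex?_range'_last] at he
        simp at he
        subst he
        have hc : ((q.length : Int) - (q.length : Int)) = ((0 : Nat) : Int) := by omega
        rw [hc, PySem.List.slice_natCast]
        simp only [Nat.sub_zero, List.drop_zero]
        rw [List.take_left]
        rw [if_neg (by omega)]
      · -- a later run is the answer
        have hmm : m = m' := by rw [hm2]; omega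
        subst hmm
        have hnotmem : m ∉ List.range' 0 (q.length + 1) := by
          intro hmem
          have := List.mem_range'_1.mp hmem
          omega
        have hmem' : m ∈ (0 :: pvLensFrom 0 rest') := by
          have h0 : (0 :: pvLensFrom 0 rest').foldl max 0 = (pvLensFrom 0 rest').foldl max 0 := by
            simp
          rcases PySem.List.foldl_max_mem (pvLensFrom 0 rest') (0 : Nat) with hz | hmem
          · exfalso
            rw [h0, hz] at hm'
            omega
          · rw [h0] at hm'
            exact List.mem_cons_of_mem _ (hm' ▸ hmem)
        obtain ⟨e', hidx⟩ : ∃ e', PySem.List.index? (0 :: pvLensFrom 0 rest') m = some e' := by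
          have := (PySem.List.index?_isSome_iff (0 :: pvLensFrom 0 rest') m).mpr hmem'
          exact Option.isSome_iff_exists.mp this
        rw [hdec, pvIndex?_append_shift _ _ _ hnotmem, hidx] at he
        simp at he
        obtain ⟨hk, hval, -⟩ := PySem.List.getElem_of_index?_eq_some hidx
        have hm'e' : m ≤ e' := by
          have := pvLens_get_le rest' e' hk
          omega
        have hIH := ih rest' hlen m e' hm'.symm (by rw [hidx]; rfl)
        rw [hF'] at hIH
        -- rewrite both slices into drop/take form
        have c0 : ((e' : Int) - (m : Int)) = (((e' - m : Nat)) : Int) := by push_cast; omega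
        rw [c0, PySem.List.slice_natCast] at hIH
        have c0' : e' - (e' - m) = m := by omega
        rw [c0'] at hIH
        subst he
        have c1 : (((e' + (q.length + 1) : Nat) : Int) - (m : Int))
            = (((q.length + 1 + (e' - m) : Nat)) : Int) := by push_cast; omega
        have c2 : ((e' + (q.length + 1) : Nat) : Int) = (((q.length + 1 + e' : Nat)) : Int) := by
          push_cast; omega
        rw [c1, c2, PySem.List.slice_natCast]
        have c3 : q.length + 1 + e' - (q.length + 1 + (e' - m)) = m := by omega
        rw [c3]
        have hassoc : q ++ d :: rest' = (q ++ [d]) ++ rest' := by simp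
        have hlen2 : q.length + 1 + (e' - m) = (q ++ [d]).length + (e' - m) := by simp
        rw [hassoc, hlen2, List.drop_length_add_append, hIH]
        rw [if_pos (by omega)]

-- ===== VERDICT (by name: the statement is the Claim_ definition above) =====
theorem extract_longest_number_string_spec : Claim_equal_extract_longest_number_string := by
  intro s _
  show extract_longest_number_string s = extract_longest_number_string_alt s
  unfold extract_longest_number_string extract_longest_number_string_alt
  simp only []
  rw [pv_main, List.nil_append, pvRuns_head,
      pvB_main s.toList.length s.toList le_rfl _ _ rfl rfl]
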